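-- pv_equiv track=rewrite | github.com/JakubDolinsky/smart_pdf_reader | AI_module/core/rewriting.py | _extract_previous_q_and_a
-- ===== SOURCE A (Python) =====
-- def _extract_previous_q_and_a(
--     embed_history: list[dict[str, str]],
-- ) -> tuple[str, str]:
--     """
--     embed_history: most recent message first (reversed slice from orchestration).
--     Returns (prev_user_question, prev_assistant_answer) from the last complete turn before current.
--     """
--     prev_question = ""
--     prev_answer = ""
--     for msg in embed_history:
--         role = (msg.get("role") or "").lower()
--         content = (msg.get("content") or "").strip()
--         if not content:
--             continue
--         if role == "assistant" and not prev_answer: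
--             prev_answer = content
--         elif role == "user" and not prev_question:
--             prev_question = content
--         if prev_question and prev_answer:
--             break
--     return prev_question, prev_answer
-- ===== SOURCE B (Python) =====
-- def _extract_previous_q_and_a(
--     embed_history: list[dict[str, str]],
-- ) -> tuple[str, str]:
--     def first_content(role: str) -> str:
--         return next(
--             (
--                 c
--                 for m in embed_history
--                 for c in [(m.get("content") or "").strip()]
--                 if (m.get("role") or "").lower() == role and c
--             ),
--             "",
--         )
--
--     return first_content("user"), first_content("assistant")
-- ===== Notes on version B (the rewrite author's own statement) =====
-- stated objective: idiomatic
-- what changed: Replaces the single shared-state loop with prev_question/prev_answer flags and a combined break by two independent generator searches (next(..., '')), one per role, each with its own early termination.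
import Mathlib
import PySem

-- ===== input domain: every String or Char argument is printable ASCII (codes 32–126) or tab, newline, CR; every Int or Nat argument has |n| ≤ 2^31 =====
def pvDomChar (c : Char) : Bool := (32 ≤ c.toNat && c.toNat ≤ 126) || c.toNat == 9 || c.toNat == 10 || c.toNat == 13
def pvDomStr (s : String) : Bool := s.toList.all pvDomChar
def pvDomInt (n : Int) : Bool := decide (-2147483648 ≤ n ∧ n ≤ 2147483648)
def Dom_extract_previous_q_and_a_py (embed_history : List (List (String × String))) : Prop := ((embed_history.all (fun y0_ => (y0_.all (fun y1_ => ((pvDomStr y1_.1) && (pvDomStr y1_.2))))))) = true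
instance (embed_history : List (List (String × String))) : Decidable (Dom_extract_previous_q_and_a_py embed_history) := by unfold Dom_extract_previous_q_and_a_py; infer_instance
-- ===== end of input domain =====

-- B replaces A's shared-state loop (prev_question/prev_answer flags + combined break)
-- by two independent first-match searches, one per role; return value equivalence proved.


-- msg.get(k) or "" : first-match association-list lookup, defaulting to ""
def pvGetS (msg : List (String × String)) (k : String) : String :=
  (msg.lookup k).getD ""

-- ===== PORT A =====
-- the loop of A: state (prev_question, prev_answer), break when both set
def pvALoop : List (List (String × String)) → String → String → String × String
  | [], q, a => (q, a)
  | msg :: rest, q, a =>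
    let role := PySem.Str.lower (pvGetS msg "role")
    let content := PySem.Str.strip (pvGetS msg "content")
    if content = "" then pvALoop rest q a
    else
      let qa := if role = "assistant" ∧ a = "" then (q, content)
                else if role = "user" ∧ q = "" then (content, a)
                else (q, a)
      if qa.1 ≠ "" ∧ qa.2 ≠ "" then qa else pvALoop rest qa.1 qa.2

def extract_previous_q_and_a_py (embed_history : List (List (String × String))) : String × String :=
  pvALoop embed_history "" ""

-- ===== PORT B =====
-- first stripped non-empty content among messages whose lowercased role equals `role`
def pvFirstContent : List (List (String × String)) → String → String
  | [], _ => ""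
  | msg :: rest, role =>
    let c := PySem.Str.strip (pvGetS msg "content")
    if PySem.Str.lower (pvGetS msg "role") = role ∧ c ≠ "" then c
    else pvFirstContent rest role

def extract_previous_q_and_a_py_alt (embed_history : List (List (String × String))) : String × String :=
  (pvFirstContent embed_history "user", pvFirstContent embed_history "assistant")

-- ===== PRECONDITION & SPEC =====
def Spec_extract_previous_q_and_a_py (embed_history : List (List (String × String))) (out : String × String) : Prop := out = extract_previous_q_and_a_py_alt embed_history
instance (embed_history : List (List (String × String))) (out : String × String) : Decidable (Spec_extract_previous_q_and_a_py embed_history out) := by unfold Spec_extract_previous_q_and_a_py; infer_instance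

-- ===== CLAIM (what is proved, stated in full; the proofs are below) =====
def Claim_equal_extract_previous_q_and_a_py : Prop := ∀ (embed_history : List (List (String × String))), Dom_extract_previous_q_and_a_py embed_history → Spec_extract_previous_q_and_a_py embed_history (extract_previous_q_and_a_py embed_history)

-- ===== LEMMAS AND PROOFS =====
theorem pvALoop_eq (h : List (List (String × String))) : ∀ q a,
    pvALoop h q a =
      ((if q = "" then pvFirstContent h "user" else q),
       (if a = "" then pvFirstContent h "assistant" else a)) := by
  induction h with
  | nil => intro q a; simp [pvALoop, pvFirstContent]
  | cons msg rest ih =>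
    intro q a
    simp only [pvALoop, pvFirstContent]
    by_cases hce : PySem.Str.strip (pvGetS msg "content") = ""
    · simp [hce, ih]
    · by_cases hA : PySem.Str.lower (pvGetS msg "role") = "assistant"
      · have hU : PySem.Str.lower (pvGetS msg "role") ≠ "user" := by rw [hA]; decide
        by_cases hq : q = "" <;> by_cases ha : a = "" <;> simp [hce, hA, hU, hq, ha, ih]
      · by_cases hU : PySem.Str.lower (pvGetS msg "role") = "user" <;>
          by_cases hq : q = "" <;> by_cases ha : a = "" <;> simp [hce, hA, hU, hq, ha, ih]

-- ===== VERDICT (by name: the statement is the Claim_ definition above) =====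
theorem extract_previous_q_and_a_py_spec : Claim_equal_extract_previous_q_and_a_py := by
  intro h _
  unfold Spec_extract_previous_q_and_a_py extract_previous_q_and_a_py extract_previous_q_and_a_py_alt
  simp [pvALoop_eq]
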